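-- pv_equiv track=rewrite | github.com/lyna1809/R-solution-de-Futoshiki-avec-un-SAT-Solveur | test.py | constraints_01
-- ===== SOURCE A (Python) =====
-- def ijk_to_num_case (a,b,c,n) :
--     v = 1
--     for i in range (1,n+1) :
--         for j in range (1,n+1) :
--             for k in range (1, n + 1) :
--                 if (a == i and b == j and k == c) :
--                     return v
--                 else :
--                     v += 1
--
-- def constraints_01 (n) :
--     constraints = []
--
--     for i in range (1,n+1) :
--         for j in range (1,n+1) :
--             constraint = []
--             for k in range (1, n + 1) :
--                 constraint.append(f"{ijk_to_num_case (i,j,k,n)} " )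
--             constraint.append (" 0 ")
--             constraints.append(constraint )
--     return constraints
-- ===== SOURCE B (Python) =====
-- def constraints_01(n):
--     # closed-form variable number (i-1)*n*n + (j-1)*n + k instead of the O(n^3) enumeration scan
--     return [[f"{(i - 1) * n * n + (j - 1) * n + k} " for k in range(1, n + 1)] + [" 0 "]
--             for i in range(1, n + 1) for j in range(1, n + 1)]
-- ===== Notes on version B (the rewrite author's own statement) =====
-- stated objective: faster
-- what changed: Replaces the O(n^3)-per-cell triple-loop enumeration scan with the closed-form index (i-1)*n*n+(j-1)*n+k, built in one comprehension; intended as asymptotically faster, though a timing run could not confirm a clean largest-size ratio (A times out on most larger inputs).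
import Mathlib
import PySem

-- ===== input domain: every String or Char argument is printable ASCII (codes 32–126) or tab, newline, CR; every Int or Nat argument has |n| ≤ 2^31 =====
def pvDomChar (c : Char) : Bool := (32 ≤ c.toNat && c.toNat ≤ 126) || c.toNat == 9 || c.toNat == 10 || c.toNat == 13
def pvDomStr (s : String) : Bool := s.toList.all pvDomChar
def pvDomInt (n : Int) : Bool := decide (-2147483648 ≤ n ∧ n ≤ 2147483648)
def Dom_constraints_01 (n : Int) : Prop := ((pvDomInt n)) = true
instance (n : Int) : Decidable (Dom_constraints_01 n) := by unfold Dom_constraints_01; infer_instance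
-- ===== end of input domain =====

-- B replaces A's per-cell enumeration scan by the closed-form index (i-1)*n*n+(j-1)*n+k (intended as asymptotically faster; a timing run could not confirm a clean largest-size ratio).

-- ===== PORT A =====
-- A-side helper: the body of the innermost loop of ijk_to_num_case; the state is
-- (found value, counter v); an early `return v` is modelled by the `some` state,
-- which every later step leaves unchanged.
def pvScan (a b c i j k : Int) (s : Option Int × Int) : Option Int × Int :=
  match s with
  | (some v, m) => (some v, m)
  | (none, v) => if a = i ∧ b = j ∧ k = c then (some v, v) else (none, v + 1)

def ijk_to_num_case (a b c n : Int) : Option Int :=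
  ((PySem.List.pyRange 1 (n+1)).foldl (fun s i =>
    (PySem.List.pyRange 1 (n+1)).foldl (fun s j =>
      (PySem.List.pyRange 1 (n+1)).foldl (fun s k => pvScan a b c i j k s) s) s)
    (none, 1)).1

def constraints_01 (n : Int) : List (List String) :=
  (PySem.List.pyRange 1 (n+1)).foldl (fun constraints i =>
    (PySem.List.pyRange 1 (n+1)).foldl (fun constraints j =>
      constraints ++ [((PySem.List.pyRange 1 (n+1)).foldl (fun constraint k =>
        constraint ++ [(match ijk_to_num_case i j k n with
          | some v => PySem.Int.toStr v
          | none => "None") ++ " "]) ([] : List String)) ++ [" 0 "]]) constraints)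
    []

-- ===== PORT B =====
def constraints_01_alt (n : Int) : List (List String) :=
  (PySem.List.pyRange 1 (n+1)).flatMap (fun i =>
    (PySem.List.pyRange 1 (n+1)).map (fun j =>
      ((PySem.List.pyRange 1 (n+1)).map (fun k =>
        PySem.Int.toStr ((i - 1) * n * n + (j - 1) * n + k) ++ " ")) ++ [" 0 "]))

-- ===== PRECONDITION & SPEC =====
def Spec_constraints_01 (n : Int) (out : List (List String)) : Prop := out = constraints_01_alt n
instance (n : Int) (out : List (List String)) : Decidable (Spec_constraints_01 n out) := by unfold Spec_constraints_01; infer_instance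

-- ===== CLAIM (what is proved, stated in full; the proofs are below) =====
def Claim_equal_constraints_01 : Prop := ∀ (n : Int), Dom_constraints_01 n → Spec_constraints_01 n (constraints_01 n)

-- ===== LEMMAS AND PROOFS =====

-- a found state is stable through the innermost (k) loop
theorem pvFoldK_found (L : List Int) (a b c i j v m : Int) :
    L.foldl (fun s k => pvScan a b c i j k s) (some v, m) = (some v, m) := by
  induction L with
  | nil => rfl
  | cons x L ih => simpa [pvScan] using ih

-- k-loop with no match: counter advances by the list length
theorem pvFoldK_miss (L : List Int) (a b c i j v : Int)
    (h : ∀ k ∈ L, ¬(a = i ∧ b = j ∧ k = c)) :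
    L.foldl (fun s k => pvScan a b c i j k s) (none, v) = (none, v + L.length) := by
  induction L generalizing v with
  | nil => simp
  | cons x L ih =>
      rw [List.foldl_cons]
      have hstep : pvScan a b c i j x (none, v) = (none, v + 1) := by
        simp [pvScan, h x (by simp)]
      rw [hstep, ih (v + 1) (fun k hk => h k (by simp [hk]))]
      simp; ring

-- k-loop with a match at c (a = i, b = j, 1 ≤ c ≤ n): returns counter + (c - 1)
theorem pvFoldK_hit (a b c v n : Int) (hc1 : 1 ≤ c) (hc2 : c ≤ n) :
    (PySem.List.pyRange 1 (n+1)).foldl (fun s k => pvScan a b c a b k s) (none, v)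
      = (some (v + (c - 1)), v + (c - 1)) := by
  rw [PySem.List.pyRange_one_append 1 c (n+1) (by omega) (by omega),
      PySem.List.pyRange_one_cons (by omega : c < n + 1), List.foldl_append,
      pvFoldK_miss _ a b c a b v (by
        intro k hk hcon
        rw [PySem.List.mem_pyRange_one] at hk
        omega)]
  have hlen : ((PySem.List.pyRange 1 c).length : Int) = c - 1 := by
    rw [PySem.List.length_pyRange_one]; omega
  rw [hlen, List.foldl_cons]
  have hstep : pvScan a b c a b c (none, v + (c - 1)) = (some (v + (c - 1)), v + (c - 1)) := by
    simp [pvScan]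
  rw [hstep]
  exact pvFoldK_found _ a b c a b _ _

-- a found state is stable through the j loop
theorem pvFoldJ_found (L : List Int) (a b c i v m n : Int) :
    L.foldl (fun s j =>
      (PySem.List.pyRange 1 (n+1)).foldl (fun s k => pvScan a b c i j k s) s) (some v, m)
      = (some v, m) := by
  induction L with
  | nil => rfl
  | cons x L ih => simpa [pvFoldK_found] using ih

-- j loop over rows that cannot match (every j in L has ¬(a = i ∧ b = j)):
-- counter advances by length * n
theorem pvFoldJ_block (L : List Int) (a b c i v n : Int) (hn : 0 ≤ n)
    (h : ∀ j ∈ L, ¬(a = i ∧ b = j)) :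
    L.foldl (fun s j =>
      (PySem.List.pyRange 1 (n+1)).foldl (fun s k => pvScan a b c i j k s) s) (none, v)
      = (none, v + L.length * n) := by
  induction L generalizing v with
  | nil => simp
  | cons x L ih =>
      rw [List.foldl_cons,
          pvFoldK_miss _ a b c i x v
            (by intro k hk hcon; exact h x (by simp) ⟨hcon.1, hcon.2.1⟩),
          PySem.List.length_pyRange_one]
      have hcast : ((n + 1 - 1).toNat : Int) = n := by omega
      rw [hcast, ih (v + n) (fun j hj => h j (by simp [hj]))]
      simp; ring

-- j loop for the row i = a (1 ≤ b ≤ n, 1 ≤ c ≤ n): finds v + (b-1)*n + (c-1)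
theorem pvFoldJ_hit (a b c v n : Int) (hb1 : 1 ≤ b) (hb2 : b ≤ n) (hc1 : 1 ≤ c) (hc2 : c ≤ n) :
    (PySem.List.pyRange 1 (n+1)).foldl (fun s j =>
      (PySem.List.pyRange 1 (n+1)).foldl (fun s k => pvScan a b c a j k s) s) (none, v)
      = (some (v + (b - 1) * n + (c - 1)), v + (b - 1) * n + (c - 1)) := by
  set F : Option Int × Int → Int → Option Int × Int := fun s j =>
    (PySem.List.pyRange 1 (n+1)).foldl (fun s k => pvScan a b c a j k s) s with hF
  rw [PySem.List.pyRange_one_append 1 b (n+1) (by omega) (by omega),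
      PySem.List.pyRange_one_cons (by omega : b < n + 1), List.foldl_append, List.foldl_cons,
      hF]
  rw [pvFoldJ_block _ a b c a v n (by omega) (by
        intro j hj hcon
        rw [PySem.List.mem_pyRange_one] at hj
        omega)]
  have hlen : ((PySem.List.pyRange 1 b).length : Int) = b - 1 := by
    rw [PySem.List.length_pyRange_one]; omega
  beta_reduce
  rw [hlen, pvFoldK_hit a b c _ n hc1 hc2, pvFoldJ_found]

-- a found state is stable through the i loop
theorem pvFoldI_found (L : List Int) (a b c v m n : Int) :
    L.foldl (fun s i =>
      (PySem.List.pyRange 1 (n+1)).foldl (fun s j =>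
        (PySem.List.pyRange 1 (n+1)).foldl (fun s k => pvScan a b c i j k s) s) s) (some v, m)
      = (some v, m) := by
  induction L with
  | nil => rfl
  | cons x L ih => simpa [pvFoldJ_found] using ih

-- i loop over rows that cannot match (every i in L differs from a)
theorem pvFoldI_block (L : List Int) (a b c v n : Int) (hn : 0 ≤ n)
    (h : ∀ i ∈ L, a ≠ i) :
    L.foldl (fun s i =>
      (PySem.List.pyRange 1 (n+1)).foldl (fun s j =>
        (PySem.List.pyRange 1 (n+1)).foldl (fun s k => pvScan a b c i j k s) s) s) (none, v)
      = (none, v + L.length * (n * n)) := by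
  induction L generalizing v with
  | nil => simp
  | cons x L ih =>
      rw [List.foldl_cons,
          pvFoldJ_block _ a b c x v n hn (by intro j hj hcon; exact h x (by simp) hcon.1),
          PySem.List.length_pyRange_one]
      have hcast : ((n + 1 - 1).toNat : Int) = n := by omega
      rw [hcast, ih (v + n * n) (fun i hi => h i (by simp [hi]))]
      simp; ring

-- the enumeration scan computes the closed-form index
theorem ijk_closed_form (a b c n : Int)
    (ha1 : 1 ≤ a) (ha2 : a ≤ n) (hb1 : 1 ≤ b) (hb2 : b ≤ n) (hc1 : 1 ≤ c) (hc2 : c ≤ n) :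
    ijk_to_num_case a b c n = some ((a - 1) * n * n + (b - 1) * n + c) := by
  unfold ijk_to_num_case
  set G : Option Int × Int → Int → Option Int × Int := fun s i =>
    (PySem.List.pyRange 1 (n+1)).foldl (fun s j =>
      (PySem.List.pyRange 1 (n+1)).foldl (fun s k => pvScan a b c i j k s) s) s with hG
  rw [PySem.List.pyRange_one_append 1 a (n+1) (by omega) (by omega),
      PySem.List.pyRange_one_cons (by omega : a < n + 1), List.foldl_append, List.foldl_cons,
      hG]
  rw [pvFoldI_block _ a b c 1 n (by omega) (by
        intro i hi hcon
        rw [PySem.List.mem_pyRange_one] at hi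
        omega)]
  have hlen : ((PySem.List.pyRange 1 a).length : Int) = a - 1 := by
    rw [PySem.List.length_pyRange_one]; omega
  beta_reduce
  rw [hlen, pvFoldJ_hit a b c _ n hb1 hb2 hc1 hc2, pvFoldI_found]
  simp only
  congr 1
  ring

theorem constraints_01_spec : Claim_equal_constraints_01 := by
  intro n _
  unfold Spec_constraints_01 constraints_01 constraints_01_alt
  simp only [PySem.List.foldl_append_singleton_eq_map, List.nil_append,
    PySem.List.foldl_append_eq_flatMap]
  apply List.flatMap_congr
  intro i hi
  rw [PySem.List.mem_pyRange_one] at hi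
  apply List.map_congr_left
  intro j hj
  rw [PySem.List.mem_pyRange_one] at hj
  congr 1
  apply List.map_congr_left
  intro k hk
  rw [PySem.List.mem_pyRange_one] at hk
  rw [ijk_closed_form i j k n (by omega) (by omega) (by omega) (by omega) (by omega) (by omega)]
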